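-- pv_equiv track=rewrite | github.com/Olorin-ai-git/Bayit-Plus | olorin-fraud/backend/app/service/agent/orchestration/hybrid/safety/recommendations/override_reasoner.py | get_reasoning_summary
-- ===== SOURCE A (Python) =====
-- from typing import TYPE_CHECKING, List
--
-- def get_reasoning_summary(reasoning: List[str]) -> str:
--     """
--     Get a concise summary of the reasoning.
--
--     Args:
--         reasoning: List of reasoning statements
--
--     Returns:
--         Concise summary of main reasoning points
--     """
--     if not reasoning:
--         return "No safety concerns identified"
--
--     # Extract key themes
--     themes = {
--         "critical": 0,
--         "resource": 0,
--         "ai_control": 0,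
--         "concerns": 0,
--         "loops": 0,
--     }
--
--     for reason in reasoning:
--         reason_lower = reason.lower()
--         if "critical" in reason_lower:
--             themes["critical"] += 1
--         if "resource" in reason_lower or "pressure" in reason_lower:
--             themes["resource"] += 1
--         if "ai control" in reason_lower:
--             themes["ai_control"] += 1
--         if "concern" in reason_lower:
--             themes["concerns"] += 1
--         if "loop" in reason_lower:
--             themes["loops"] += 1
--
--     # Build summary based on dominant themes
--     summary_parts = []
--     if themes["critical"] > 0:
--         summary_parts.append("critical safety issues")
--     if themes["ai_control"] > 0:
--         summary_parts.append("AI control restrictions")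
--     if themes["resource"] > 0:
--         summary_parts.append("resource pressure")
--     if themes["loops"] > 0:
--         summary_parts.append("loop count concerns")
--
--     if summary_parts:
--         return f"Safety overrides due to: {', '.join(summary_parts)}"
--     else:
--         return f"{len(reasoning)} safety considerations identified"
-- ===== SOURCE B (Python) =====
-- def get_reasoning_summary(reasoning):
--     """Summarize reasoning via short-circuit membership scans (no counter dict)."""
--     if not reasoning:
--         return "No safety concerns identified"
--
--     lowered = [r.lower() for r in reasoning]
--     has_critical = any("critical" in r for r in lowered)
--     has_ai = any("ai control" in r for r in lowered)
--     has_resource = any("resource" in r or "pressure" in r for r in lowered)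
--     has_loops = any("loop" in r for r in lowered)
--
--     parts = []
--     if has_critical:
--         parts.append("critical safety issues")
--     if has_ai:
--         parts.append("AI control restrictions")
--     if has_resource:
--         parts.append("resource pressure")
--     if has_loops:
--         parts.append("loop count concerns")
--
--     if parts:
--         return "Safety overrides due to: " + ", ".join(parts)
--     return str(len(reasoning)) + " safety considerations identified"
-- ===== Notes on version B (the rewrite author's own statement) =====
-- stated objective: simpler
-- what changed: Replaces the accumulating theme-counter dict (with its unused 'concerns' count and magnitudes) by four boolean short-circuiting any() scans over the lowercased strings, from which the summary parts are built directly.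
import Mathlib
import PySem

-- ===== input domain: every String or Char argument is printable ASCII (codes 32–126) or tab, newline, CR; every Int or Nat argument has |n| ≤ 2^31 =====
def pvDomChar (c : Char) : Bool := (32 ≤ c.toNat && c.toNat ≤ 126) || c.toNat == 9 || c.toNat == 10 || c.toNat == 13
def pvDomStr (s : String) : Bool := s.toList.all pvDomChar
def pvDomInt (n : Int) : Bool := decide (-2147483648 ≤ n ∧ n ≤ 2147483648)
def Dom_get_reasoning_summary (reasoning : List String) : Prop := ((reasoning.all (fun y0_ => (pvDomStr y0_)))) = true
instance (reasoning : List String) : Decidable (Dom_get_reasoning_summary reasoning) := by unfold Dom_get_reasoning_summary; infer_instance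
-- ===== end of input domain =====

-- B drops A's theme-counter dict in favour of four boolean any-scans; objective: simpler.

-- ===== PORT A =====
-- the body of A's 'for reason in reasoning' loop (helper stays a helper)
def pvStepA (d : PySem.Dict String Int) (reason : String) : PySem.Dict String Int :=
  let rl := PySem.Str.lower reason
  let d := if PySem.Str.isIn "critical" rl then d.insert "critical" (d.getD "critical" 0 + 1) else d
  let d := if PySem.Str.isIn "resource" rl || PySem.Str.isIn "pressure" rl then
             d.insert "resource" (d.getD "resource" 0 + 1) else d
  let d := if PySem.Str.isIn "ai control" rl then d.insert "ai_control" (d.getD "ai_control" 0 + 1) else d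
  let d := if PySem.Str.isIn "concern" rl then d.insert "concerns" (d.getD "concerns" 0 + 1) else d
  let d := if PySem.Str.isIn "loop" rl then d.insert "loops" (d.getD "loops" 0 + 1) else d
  d

def get_reasoning_summary (reasoning : List String) : String :=
  if reasoning == [] then "No safety concerns identified"
  else
    let themes : PySem.Dict String Int :=
      PySem.Dict.ofList [("critical", 0), ("resource", 0), ("ai_control", 0), ("concerns", 0), ("loops", 0)]
    let themes := reasoning.foldl pvStepA themes
    let summary_parts : List String := []
    let summary_parts := if themes.getD "critical" 0 > 0 then summary_parts ++ ["critical safety issues"] else summary_parts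
    let summary_parts := if themes.getD "ai_control" 0 > 0 then summary_parts ++ ["AI control restrictions"] else summary_parts
    let summary_parts := if themes.getD "resource" 0 > 0 then summary_parts ++ ["resource pressure"] else summary_parts
    let summary_parts := if themes.getD "loops" 0 > 0 then summary_parts ++ ["loop count concerns"] else summary_parts
    if summary_parts ≠ [] then
      PySem.Str.join "" ["Safety overrides due to: ", PySem.Str.join ", " summary_parts]
    else
      PySem.Str.join "" [PySem.Int.toStr reasoning.length, " safety considerations identified"]

-- ===== PORT B =====
def get_reasoning_summary_alt (reasoning : List String) : String :=
  if reasoning == [] then "No safety concerns identified"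
  else
    let lowered := reasoning.map PySem.Str.lower
    let hasCritical := lowered.any (fun r => PySem.Str.isIn "critical" r)
    let hasAi := lowered.any (fun r => PySem.Str.isIn "ai control" r)
    let hasResource := lowered.any (fun r => PySem.Str.isIn "resource" r || PySem.Str.isIn "pressure" r)
    let hasLoops := lowered.any (fun r => PySem.Str.isIn "loop" r)
    let parts : List String := []
    let parts := if hasCritical then parts ++ ["critical safety issues"] else parts
    let parts := if hasAi then parts ++ ["AI control restrictions"] else parts
    let parts := if hasResource then parts ++ ["resource pressure"] else parts
    let parts := if hasLoops then parts ++ ["loop count concerns"] else parts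
    if parts ≠ [] then
      PySem.Str.join "" ["Safety overrides due to: ", PySem.Str.join ", " parts]
    else
      PySem.Str.join "" [PySem.Int.toStr reasoning.length, " safety considerations identified"]

-- ===== PRECONDITION & SPEC =====
def Spec_get_reasoning_summary (reasoning : List String) (out : String) : Prop := out = get_reasoning_summary_alt reasoning
instance (reasoning : List String) (out : String) : Decidable (Spec_get_reasoning_summary reasoning out) := by unfold Spec_get_reasoning_summary; infer_instance

-- ===== CLAIM (what is proved, stated in full; the proofs are below) =====
def Claim_equal_get_reasoning_summary : Prop := ∀ (reasoning : List String), Dom_get_reasoning_summary reasoning → Spec_get_reasoning_summary reasoning (get_reasoning_summary reasoning)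

-- ===== LEMMAS AND PROOFS =====

-- after one step of A's loop, each counter grows by 0/1 according to its predicate
theorem pvStepA_getD (d : PySem.Dict String Int) (r : String) :
    (pvStepA d r).getD "critical" 0
      = d.getD "critical" 0 + (if PySem.Str.isIn "critical" (PySem.Str.lower r) then 1 else 0)
  ∧ (pvStepA d r).getD "ai_control" 0
      = d.getD "ai_control" 0 + (if PySem.Str.isIn "ai control" (PySem.Str.lower r) then 1 else 0)
  ∧ (pvStepA d r).getD "resource" 0
      = d.getD "resource" 0 + (if PySem.Str.isIn "resource" (PySem.Str.lower r) || PySem.Str.isIn "pressure" (PySem.Str.lower r) then 1 else 0)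
  ∧ (pvStepA d r).getD "loops" 0
      = d.getD "loops" 0 + (if PySem.Str.isIn "loop" (PySem.Str.lower r) then 1 else 0) := by
  unfold pvStepA
  by_cases h1 : PySem.Str.isIn "critical" (PySem.Str.lower r) = true <;>
  by_cases h2 : (PySem.Str.isIn "resource" (PySem.Str.lower r) || PySem.Str.isIn "pressure" (PySem.Str.lower r)) = true <;>
  by_cases h3 : PySem.Str.isIn "ai control" (PySem.Str.lower r) = true <;>
  by_cases h4 : PySem.Str.isIn "concern" (PySem.Str.lower r) = true <;>
  by_cases h5 : PySem.Str.isIn "loop" (PySem.Str.lower r) = true <;>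
  simp_all [PySem.Dict.getD_insert]

theorem foldl_pvStepA_getD (l : List String) (d : PySem.Dict String Int) :
    (l.foldl pvStepA d).getD "critical" 0
      = d.getD "critical" 0 + (l.countP (fun r => PySem.Str.isIn "critical" (PySem.Str.lower r)) : Int)
  ∧ (l.foldl pvStepA d).getD "ai_control" 0
      = d.getD "ai_control" 0 + (l.countP (fun r => PySem.Str.isIn "ai control" (PySem.Str.lower r)) : Int)
  ∧ (l.foldl pvStepA d).getD "resource" 0
      = d.getD "resource" 0 + (l.countP (fun r => PySem.Str.isIn "resource" (PySem.Str.lower r) || PySem.Str.isIn "pressure" (PySem.Str.lower r)) : Int)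
  ∧ (l.foldl pvStepA d).getD "loops" 0
      = d.getD "loops" 0 + (l.countP (fun r => PySem.Str.isIn "loop" (PySem.Str.lower r)) : Int) := by
  induction l generalizing d with
  | nil => simp
  | cons x xs ih =>
    obtain ⟨s1, s2, s3, s4⟩ := pvStepA_getD d x
    obtain ⟨i1, i2, i3, i4⟩ := ih (pvStepA d x)
    refine ⟨?_, ?_, ?_, ?_⟩ <;>
      simp only [List.foldl_cons, List.countP_cons, i1, i2, i3, i4, s1, s2, s3, s4] <;>
      split_ifs <;> push_cast <;> ring

theorem countP_pos_iff_any (l : List String) (p : String → Bool) :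
    (0 < (l.countP p : Int)) ↔ l.any p = true := by
  simp [List.countP_pos_iff, List.any_eq_true]

-- ===== VERDICT (by name: the statement is the Claim_ definition above) =====
theorem get_reasoning_summary_spec : Claim_equal_get_reasoning_summary := by
  intro reasoning _
  unfold Spec_get_reasoning_summary get_reasoning_summary get_reasoning_summary_alt
  by_cases hnil : reasoning = []
  · simp [hnil]
  · simp only [beq_iff_eq, hnil, if_false]
    obtain ⟨c1, c2, c3, c4⟩ := foldl_pvStepA_getD reasoning
      (PySem.Dict.ofList [("critical", 0), ("resource", 0), ("ai_control", 0), ("concerns", 0), ("loops", 0)])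
    simp only [c1, c2, c3, c4]
    have i1 : (PySem.Dict.ofList [("critical", (0:Int)), ("resource", 0), ("ai_control", 0), ("concerns", 0), ("loops", 0)]).getD "critical" 0 = 0 := by decide
    have i2 : (PySem.Dict.ofList [("critical", (0:Int)), ("resource", 0), ("ai_control", 0), ("concerns", 0), ("loops", 0)]).getD "ai_control" 0 = 0 := by decide
    have i3 : (PySem.Dict.ofList [("critical", (0:Int)), ("resource", 0), ("ai_control", 0), ("concerns", 0), ("loops", 0)]).getD "resource" 0 = 0 := by decide
    have i4 : (PySem.Dict.ofList [("critical", (0:Int)), ("resource", 0), ("ai_control", 0), ("concerns", 0), ("loops", 0)]).getD "loops" 0 = 0 := by decide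
    simp only [i1, i2, i3, i4, zero_add, List.any_map, Function.comp_def,
      countP_pos_iff_any]
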